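-- pv_equiv track=rewrite | github.com/dmwm/DAS | src/python/DAS/core/das_aggregators.py | cochain
-- ===== SOURCE A (Python) =====
-- def cochain(ckey, data_name, sink_name):
--     """
--     Construct coroutine chain for given compound key, data object name
--     and sink name. Here is an example of such chain:
--
--     .. doctest:
--
--         decomposer(data,
--             filter('block',
--                 filter('replica',
--                     filter('size', sink
--                     )
--                 )
--             )
--         )
--
--     """
--     code  = "decomposer(%s," % data_name
--     count_bracket = 1 # bracket is open
--     for key in ckey.split('.'):
--         code  += "selector('%s'," % key
--         count_bracket += 1
--     code += sink_name
--     for _ in range(0, count_bracket):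
--         code += ")"
--     return code
-- ===== SOURCE B (Python) =====
-- def cochain(ckey, data_name, sink_name):
--     inner = sink_name
--     for key in reversed(ckey.split('.')):
--         inner = "selector('%s',%s)" % (key, inner)
--     return "decomposer(%s,%s)" % (data_name, inner)
-- ===== Notes on version B (the rewrite author's own statement) =====
-- stated objective: simpler
-- what changed: Replaced the forward concatenation with an explicit open-bracket counter and a closing-bracket loop by an inside-out foldr: start from the sink and wrap each key (in reverse order) as selector('key',inner), so no bracket counting or second loop is needed.
import Mathlib
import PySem

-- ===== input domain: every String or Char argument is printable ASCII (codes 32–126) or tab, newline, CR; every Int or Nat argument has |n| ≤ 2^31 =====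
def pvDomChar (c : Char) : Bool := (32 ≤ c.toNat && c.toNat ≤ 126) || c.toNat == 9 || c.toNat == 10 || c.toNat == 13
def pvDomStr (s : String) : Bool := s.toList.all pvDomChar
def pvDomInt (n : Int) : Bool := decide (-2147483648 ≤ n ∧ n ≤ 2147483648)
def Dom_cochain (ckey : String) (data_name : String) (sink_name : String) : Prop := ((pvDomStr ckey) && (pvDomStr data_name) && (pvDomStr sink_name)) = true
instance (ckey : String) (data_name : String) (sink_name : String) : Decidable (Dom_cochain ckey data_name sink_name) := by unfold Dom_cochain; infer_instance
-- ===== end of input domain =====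

-- B builds the string inside-out from the sink (a foldr wrapping each key), replacing A's
-- forward concatenation plus open-bracket counter and closing-bracket loop; same output, simpler.

-- ===== PORT A =====
-- literal transliteration of A: forward fold accumulating (code, count_bracket), then sink,
-- then a range(0, count_bracket) loop appending ")" each iteration
def cochain (ckey : String) (data_name : String) (sink_name : String) : String :=
  let code : List Char := "decomposer(".toList ++ data_name.toList ++ [',']
  let st := (PySem.Chars.splitOn ckey.toList ['.']).foldl
      (fun (st : List Char × Nat) key =>
        (st.1 ++ "selector('".toList ++ key ++ "',".toList, st.2 + 1))
      (code, 1)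
  let code := st.1 ++ sink_name.toList
  let code := (PySem.List.pyRange 0 (Int.ofNat st.2) 1).foldl (fun c _ => c ++ [')']) code
  String.ofList code

-- ===== PORT B =====
-- literal transliteration of B: inner starts as the sink, each key of reversed(split) wraps it
def cochain_alt (ckey : String) (data_name : String) (sink_name : String) : String :=
  let inner := (PySem.Chars.splitOn ckey.toList ['.']).reverse.foldl
      (fun inner key => "selector('".toList ++ key ++ "',".toList ++ inner ++ [')'])
      sink_name.toList
  String.ofList ("decomposer(".toList ++ data_name.toList ++ [','] ++ inner ++ [')'])

-- ===== PRECONDITION & SPEC =====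
def Spec_cochain (ckey : String) (data_name : String) (sink_name : String) (out : String) : Prop := out = cochain_alt ckey data_name sink_name
instance (ckey : String) (data_name : String) (sink_name : String) (out : String) : Decidable (Spec_cochain ckey data_name sink_name out) := by unfold Spec_cochain; infer_instance

-- ===== CLAIM (what is proved, stated in full; the proofs are below) =====
def Claim_equal_cochain : Prop := ∀ (ckey : String) (data_name : String) (sink_name : String), Dom_cochain ckey data_name sink_name → Spec_cochain ckey data_name sink_name (cochain ckey data_name sink_name)

-- ===== LEMMAS AND PROOFS =====

-- A's selector fold: accumulated code = initial code + each key's prefix; count = initial + #keys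
lemma selFold_eq (ks : List (List Char)) : ∀ (c : List Char) (n : Nat),
    ks.foldl (fun (st : List Char × Nat) key =>
        (st.1 ++ "selector('".toList ++ key ++ "',".toList, st.2 + 1)) (c, n)
      = (c ++ ks.flatMap (fun k => "selector('".toList ++ k ++ "',".toList), n + ks.length) := by
  induction ks with
  | nil => intro c n; simp
  | cons k ks ih =>
      intro c n
      rw [List.foldl_cons, ih, List.flatMap_cons]
      refine Prod.ext ?_ ?_
      · simp
      · simp; omega

-- A's closing-bracket loop appends one ')' per loop iteration
lemma closeFold_eq (l : List Int) : ∀ (c : List Char),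
    l.foldl (fun c _ => c ++ [')']) c = c ++ List.replicate l.length ')' := by
  induction l with
  | nil => intro c; simp
  | cons x l ih =>
      intro c
      rw [List.foldl_cons, ih, List.append_assoc]
      congr 1

-- core: forward prefixes + sink + closing brackets = inside-out wrapping
lemma core_eq (ks : List (List Char)) (s : List Char) :
    ks.flatMap (fun k => "selector('".toList ++ k ++ "',".toList) ++ s
        ++ List.replicate ks.length ')'
      = ks.reverse.foldl
          (fun inner key => "selector('".toList ++ key ++ "',".toList ++ inner ++ [')']) s := by
  induction ks with
  | nil => simp
  | cons k ks ih =>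
      simp only [List.flatMap_cons, List.length_cons, List.replicate_succ',
        List.reverse_cons, List.foldl_append, List.foldl_cons, List.foldl_nil, ← ih]
      simp

-- ===== VERDICT (by name: the statement is the Claim_ definition above) =====
theorem cochain_spec : Claim_equal_cochain := by
  intro ckey data_name sink_name _
  show cochain ckey data_name sink_name = cochain_alt ckey data_name sink_name
  unfold cochain cochain_alt
  simp only [selFold_eq, closeFold_eq]
  congr 1
  have hlen : (PySem.List.pyRange 0
      (Int.ofNat (1 + (PySem.Chars.splitOn ckey.toList ['.']).length)) 1).length
      = 1 + (PySem.Chars.splitOn ckey.toList ['.']).length := by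
    simp [PySem.List.length_pyRange_one]
    omega
  rw [hlen, ← core_eq]
  simp [List.replicate_succ', List.replicate_add]
  rw [← List.replicate_succ, List.replicate_succ']
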